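-- pv_equiv track=rewrite | github.com/google/saxml | saxml/server/pax/lm/vocabularies.py | _split_whitespaces_or_nonwhitespaces
-- ===== SOURCE A (Python) =====
-- from typing import cast, Dict, Iterator, List, Sequence
--
-- def _split_whitespaces_or_nonwhitespaces(
--     s: str, max_consecutive_slice_len: int
-- ) -> Iterator[str]:
--   """Splits the string `s`.
--
--   Args:
--     s: The string to split.
--     max_consecutive_slice_len: The maximum number of consecutive whitespaces
--       or consecutive non-whitespaces in each substring.
--
--   Yields:
--     The substrings.
--   """
--   current_slice_len = 0
--   current_slice_is_space = s[0].isspace() if s else False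
--   slice_start = 0
--
--   for i in range(len(s)):
--     is_now_space = s[i].isspace()
--
--     if current_slice_is_space ^ is_now_space:
--       current_slice_len = 1
--       current_slice_is_space = is_now_space
--     else:
--       current_slice_len += 1
--       if current_slice_len > max_consecutive_slice_len:
--         yield s[slice_start:i]
--         slice_start = i
--         current_slice_len = 1
--   yield s[slice_start:]
-- ===== SOURCE B (Python) =====
-- from itertools import groupby
--
--
-- def _split_whitespaces_or_nonwhitespaces(s, max_consecutive_slice_len):
--     """Splits `s` by grouping it into maximal whitespace/non-whitespace runs,
--     computing all cut offsets arithmetically, then slicing between bounds."""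
--     cuts = []
--     offset = 0
--     for _, grp in groupby(s, key=str.isspace):
--         run_len = len(list(grp))
--         cuts.extend(range(offset + max_consecutive_slice_len,
--                           offset + run_len,
--                           max_consecutive_slice_len))
--         offset += run_len
--     bounds = [0] + cuts + [len(s)]
--     for a, b in zip(bounds, bounds[1:]):
--         yield s[a:b]
-- ===== Notes on version B (the rewrite author's own statement) =====
-- stated objective: alternative
-- what changed: Replaces A's per-character state machine (slice length counter, class flag, slice start) with a runs-then-offsets-then-slice decomposition: group the string into maximal whitespace/non-whitespace runs with itertools.groupby, compute every cut offset arithmetically with range(offset+max, offset+run_len, max), then slice between consecutive bounds.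
-- outside the precondition, e.g. on _split_whitespaces_or_nonwhitespaces('ab', 0): A returns ['', 'a', 'b'], B raises ValueError; on _split_whitespaces_or_nonwhitespaces('a b', -1): A returns ['', 'a b'], B returns ['a b']
import Mathlib
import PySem

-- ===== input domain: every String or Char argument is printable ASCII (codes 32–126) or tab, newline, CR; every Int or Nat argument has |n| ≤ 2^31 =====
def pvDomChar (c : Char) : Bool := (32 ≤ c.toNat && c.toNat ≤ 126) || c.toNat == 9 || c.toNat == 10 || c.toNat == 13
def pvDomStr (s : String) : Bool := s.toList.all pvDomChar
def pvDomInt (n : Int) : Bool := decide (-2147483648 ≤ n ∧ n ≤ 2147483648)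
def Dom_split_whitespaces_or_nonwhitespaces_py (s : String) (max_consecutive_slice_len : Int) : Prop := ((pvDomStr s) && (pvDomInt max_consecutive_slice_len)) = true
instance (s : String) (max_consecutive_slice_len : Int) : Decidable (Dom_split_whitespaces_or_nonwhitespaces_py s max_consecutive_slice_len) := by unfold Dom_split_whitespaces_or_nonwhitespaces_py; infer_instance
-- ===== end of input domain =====

-- B replaces A's per-character state machine by a runs-then-cut-offsets-then-slice
-- decomposition (objective: alternative decomposition; Python B does most work in C-level calls).

-- ===== PORT A =====
-- the `for i in range(len(s))` loop of A: recursion over the remaining iteration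
-- count k, with i the current index and (l, sp, st, acc) the loop state
-- (current_slice_len, current_slice_is_space, slice_start, yielded slices).
def pvAloop (s : String) (cs : List Char) (m : Int) :
    Nat → Int → Int → Bool → Int → List String → Int × Bool × Int × List String
  | 0, _, l, sp, st, acc => (l, sp, st, acc)
  | k + 1, i, l, sp, st, acc =>
    let nowSp := PySem.Chars.isspace (PySem.List.pyGetD cs i ' ')
    if sp != nowSp then
      pvAloop s cs m k (i + 1) 1 nowSp st acc
    else
      if l + 1 > m then
        pvAloop s cs m k (i + 1) 1 sp i (acc ++ [PySem.Str.slice s (some st) (some i)])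
      else
        pvAloop s cs m k (i + 1) (l + 1) sp st acc

def split_whitespaces_or_nonwhitespaces_py (s : String) (max_consecutive_slice_len : Int) : List String :=
  let cs := s.toList
  let sp0 : Bool := match cs with
    | [] => false
    | c :: _ => PySem.Chars.isspace c
  let r := pvAloop s cs max_consecutive_slice_len cs.length 0 0 sp0 0 []
  r.2.2.2 ++ [PySem.Str.slice s (some r.2.2.1) none]

-- ===== PORT B =====
-- itertools.groupby(s, key=str.isspace): the lengths of the maximal runs of
-- same-whitespace-class characters, in order.
def pvRuns : List Char → List Nat
  | [] => []
  | c :: rest =>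
    ((rest.takeWhile (fun d => PySem.Chars.isspace d == PySem.Chars.isspace c)).length + 1)
      :: pvRuns (rest.dropWhile (fun d => PySem.Chars.isspace d == PySem.Chars.isspace c))
  termination_by l => l.length
  decreasing_by
    simpa using Nat.lt_succ_of_le (List.length_dropWhile_le _ _)

-- cuts.extend(range(offset + m, offset + run_len, m)) over the runs, tracking offset
def pvCuts (m : Int) : List Nat → Int → List Int
  | [], _ => []
  | L :: rs, off => PySem.List.pyRange (off + m) (off + (L : Int)) m ++ pvCuts m rs (off + (L : Int))

def split_whitespaces_or_nonwhitespaces_py_alt (s : String) (max_consecutive_slice_len : Int) : List String :=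
  let cs := s.toList
  let n : Int := cs.length
  let bounds : List Int := 0 :: (pvCuts max_consecutive_slice_len (pvRuns cs) 0 ++ [n])
  (bounds.zip bounds.tail).map (fun p => PySem.Str.slice s (some p.1) (some p.2))

-- ===== PRECONDITION & SPEC =====
-- Pre_ excludes non-positive max_consecutive_slice_len on non-empty strings: a nonsensical
-- cap outside the function's natural domain, where A's chopping (a leading empty slice and
-- per-character pieces) is an artefact of its state machine and B's arithmetic cut-stepping
-- raises ValueError (max = 0) or yields the whole string (max < 0).
def Pre_split_whitespaces_or_nonwhitespaces_py (s : String) (max_consecutive_slice_len : Int) : Prop :=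
  1 ≤ max_consecutive_slice_len ∨ s = ""
instance (s : String) (max_consecutive_slice_len : Int) : Decidable (Pre_split_whitespaces_or_nonwhitespaces_py s max_consecutive_slice_len) := by unfold Pre_split_whitespaces_or_nonwhitespaces_py; infer_instance

def pvWitness_split_whitespaces_or_nonwhitespaces_py : String × Int := ("ab  cde f", 2)

def Spec_split_whitespaces_or_nonwhitespaces_py (s : String) (max_consecutive_slice_len : Int) (out : List String) : Prop := out = split_whitespaces_or_nonwhitespaces_py_alt s max_consecutive_slice_len
instance (s : String) (max_consecutive_slice_len : Int) (out : List String) : Decidable (Spec_split_whitespaces_or_nonwhitespaces_py s max_consecutive_slice_len out) := by unfold Spec_split_whitespaces_or_nonwhitespaces_py; infer_instance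

-- ===== CLAIM (what is proved, stated in full; the proofs are below) =====
def Claim_equal_split_whitespaces_or_nonwhitespaces_py : Prop := ∀ (s : String) (max_consecutive_slice_len : Int), Dom_split_whitespaces_or_nonwhitespaces_py s max_consecutive_slice_len → Pre_split_whitespaces_or_nonwhitespaces_py s max_consecutive_slice_len → Spec_split_whitespaces_or_nonwhitespaces_py s max_consecutive_slice_len (split_whitespaces_or_nonwhitespaces_py s max_consecutive_slice_len)

-- ===== LEMMAS AND PROOFS =====

-- the slices between consecutive members of a bounds list a :: bs
def pvWalk (s : String) : Int → List Int → List String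
  | _, [] => []
  | a, b :: r => PySem.Str.slice s (some a) (some b) :: pvWalk s b r

lemma pvWalk_eq_zip_map (s : String) :
    ∀ (bs : List Int) (a : Int),
      (((a :: bs).zip bs).map (fun p => PySem.Str.slice s (some p.1) (some p.2)))
        = pvWalk s a bs := by
  intro bs
  induction bs with
  | nil => intro a; rfl
  | cons b r ih =>
    intro a
    simp only [List.zip_cons_cons, List.map_cons, pvWalk]
    exact congrArg _ (ih b)

lemma pvWalk_append (s : String) :
    ∀ (xs ys : List Int) (a : Int),
      pvWalk s a (xs ++ ys) = pvWalk s a xs ++ pvWalk s (xs.getLastD a) ys := by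
  intro xs
  induction xs with
  | nil => intro ys a; rfl
  | cons x t ih =>
    intro ys a
    simp only [List.cons_append, pvWalk, ih, List.getLastD_cons]

lemma pvGetLastD_append {α : Type} (xs ys : List α) (d : α) :
    (xs ++ ys).getLastD d = ys.getLastD (xs.getLastD d) := by
  induction xs generalizing d with
  | nil => rfl
  | cons x t ih => simp only [List.cons_append, List.getLastD_cons, ih]

lemma pvGetLastD_mem_or_eq_aux {α : Type} (xs : List α) (d : α) :
    xs.getLastD d = d ∨ xs.getLastD d ∈ xs := by
  induction xs generalizing d with
  | nil => exact Or.inl rfl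
  | cons x t ih =>
    right
    rw [List.getLastD_cons]
    rcases ih x with h | h
    · rw [h]; exact List.mem_cons_self
    · exact List.mem_cons_of_mem _ h

lemma pvGetLastD_mem_or_eq {α : Type} (xs : List α) (d : α) :
    xs.getLastD d = d ∨ xs.getLastD d ∈ xs := by
  cases xs with
  | nil => exact Or.inl rfl
  | cons x t =>
    right
    rw [List.getLastD_cons]
    rcases pvGetLastD_mem_or_eq_aux t x with h | h
    · rw [h]; exact List.mem_cons_self
    · exact List.mem_cons_of_mem _ h

-- pyRange with a positive step: induction forms
lemma pvPyRange_pos_nil (a b m : Int) (hm : 0 < m) (h : b ≤ a) :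
    PySem.List.pyRange a b m = [] := by
  rw [PySem.List.pyRange_of_pos a b hm]
  simp [show ¬ a < b by omega]

lemma pvPyRange_pos_cons (a b m : Int) (hm : 0 < m) (h : a < b) :
    PySem.List.pyRange a b m = a :: PySem.List.pyRange (a + m) b m := by
  rw [PySem.List.pyRange_of_pos a b hm, PySem.List.pyRange_of_pos (a + m) b hm]
  have hcnt : ((b - a + m - 1) / m).toNat = ((b - (a + m) + m - 1) / m).toNat + 1 := by
    have h1 : (b - a + m - 1) / m = (b - (a + m) + m - 1) / m + 1 := by
      have : b - a + m - 1 = (b - (a + m) + m - 1) + 1 * m := by ring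
      rw [this, Int.add_mul_ediv_right _ _ (by omega : m ≠ 0)]
    have h2 : 0 ≤ (b - (a + m) + m - 1) / m := by
      by_cases hb : a + m < b
      · exact Int.ediv_nonneg (by omega) (by omega)
      · -- b ≤ a + m : numerator is b - a - 1 ∈ [0, m-1], quotient 0
        exact Int.ediv_nonneg (by omega) (by omega)
    omega
  by_cases hb : a + m < b
  · rw [if_pos h, if_pos hb, hcnt, List.range_succ_eq_map]
    simp only [List.map_cons, List.map_map, Function.comp_def, Nat.cast_zero, mul_zero, add_zero]
    refine congrArg₂ _ rfl ?_
    apply List.map_congr_left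
    intro k _
    push_cast
    ring
  · rw [if_pos h, if_neg hb, hcnt]
    have hz : ((b - (a + m) + m - 1) / m).toNat = 0 := by
      have : (b - (a + m) + m - 1) / m = 0 := by
        apply Int.ediv_eq_zero_of_lt <;> omega
      omega
    rw [hz]
    simp

-- every cut lies strictly between off and off + (sum of the runs)
lemma pvCuts_mem_bounds (m : Int) (hm : 1 ≤ m) :
    ∀ (rs : List Nat) (off x : Int), x ∈ pvCuts m rs off →
      off < x ∧ x < off + (rs.sum : Int) := by
  intro rs
  induction rs with
  | nil => intro off x hx; simp [pvCuts] at hx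
  | cons L t ih =>
    intro off x hx
    simp only [pvCuts, List.mem_append] at hx
    rcases hx with hx | hx
    · rcases (PySem.List.mem_pyRange_iff_of_pos (by omega) x).mp hx with ⟨h1, h2, _⟩
      have hs := Int.natCast_nonneg t.sum
      rw [List.sum_cons]
      push_cast at hs ⊢
      constructor <;> omega
    · rcases ih (off + (L : Int)) x hx with ⟨h1, h2⟩
      rw [List.sum_cons]
      push_cast at h1 h2 ⊢
      constructor <;> omega

-- getD through a drop
lemma pvGetD_drop (cs rest : List Char) (q j : Nat) (h : cs.drop q = rest) (d : Char) :
    cs.getD (q + j) d = rest.getD j d := by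
  have := List.getElem?_drop (xs := cs) (i := q) (j := j)
  rw [h] at this
  simp [List.getD, this]

-- processing the tail of a run (all of class c) from state l = q - r, 1 ≤ l ≤ m:
-- A yields exactly the slices between consecutive cuts r + m, r + 2m, … < q + k
lemma pvRun_tail (s : String) (cs : List Char) (m : Int) (hm : 1 ≤ m) (c : Bool) :
    ∀ (k q : Nat) (r l st : Int) (acc : List String),
      (∀ j : Nat, q ≤ j → j < q + k → PySem.Chars.isspace (cs.getD j ' ') = c) →
      r < (q : Int) → (q : Int) ≤ r + m → l = (q : Int) - r →
      pvAloop s cs m k (q : Int) l c st acc =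
        ( (q : Int) + (k : Int) - (PySem.List.pyRange (r + m) ((q : Int) + (k : Int)) m).getLastD r,
          c,
          (PySem.List.pyRange (r + m) ((q : Int) + (k : Int)) m).getLastD st,
          acc ++ pvWalk s st (PySem.List.pyRange (r + m) ((q : Int) + (k : Int)) m) ) := by
  intro k
  induction k with
  | zero =>
    intro q r l st acc hcls hr1 hr2 hl
    rw [pvPyRange_pos_nil _ _ _ (by omega) (by push_cast; omega)]
    subst hl
    simp [pvAloop, pvWalk]
  | succ k ih =>
    intro q r l st acc hcls hr1 hr2 hl
    have hc : PySem.Chars.isspace (PySem.List.pyGetD cs ((q : Nat) : Int) ' ') = c := by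
      rw [PySem.List.pyGetD_natCast]
      exact hcls q le_rfl (by omega)
    have hq1 : ((q : Int)) + 1 = ((q + 1 : Nat) : Int) := by push_cast; ring
    have hend : (q : Int) + ((k + 1 : Nat) : Int) = ((q + 1 : Nat) : Int) + (k : Int) := by
      push_cast; ring
    have hcls' : ∀ j : Nat, q + 1 ≤ j → j < (q + 1) + k →
        PySem.Chars.isspace (cs.getD j ' ') = c := by
      intro j h1 h2; exact hcls j (by omega) (by omega)
    simp only [pvAloop, hc, bne_self_eq_false, Bool.false_eq_true, if_false]
    by_cases hcut : l + 1 > m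
    · -- a cut at index q: q = r + m
      rw [if_pos hcut, hq1,
        ih (q + 1) (q : Int) 1 (q : Int) (acc ++ [PySem.Str.slice s (some st) (some (q : Int))])
          hcls' (by push_cast; omega) (by push_cast; omega) (by push_cast; ring), hend]
      have hq : r + m = (q : Int) := by omega
      rw [pvPyRange_pos_cons (r + m) (((q + 1 : Nat) : Int) + (k : Int)) m (by omega)
        (by push_cast; omega), hq]
      simp only [List.getLastD_cons, pvWalk, List.append_assoc, List.singleton_append]
    · -- no cut: the slice keeps growing
      rw [if_neg hcut, hq1,
        ih (q + 1) r (l + 1) st acc hcls' (by push_cast; omega) (by push_cast; omega)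
          (by push_cast; omega), hend]

-- splitting A's loop: k1 + k2 iterations are k1 iterations then k2 more
lemma pvAloop_add (s : String) (cs : List Char) (m : Int) :
    ∀ (k1 k2 : Nat) (i l : Int) (sp : Bool) (st : Int) (acc : List String),
      pvAloop s cs m (k1 + k2) i l sp st acc =
        (fun r => pvAloop s cs m k2 (i + (k1 : Int)) r.1 r.2.1 r.2.2.1 r.2.2.2)
          (pvAloop s cs m k1 i l sp st acc) := by
  intro k1
  induction k1 with
  | zero => intro k2 i l sp st acc; simp [pvAloop]
  | succ k ih =>
    intro k2 i l sp st acc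
    have e : i + 1 + (k : Int) = i + ((k + 1 : Nat) : Int) := by push_cast; ring
    rw [Nat.succ_add]
    simp only [pvAloop]
    split_ifs with h1 h2
    · rw [ih, e]
    · rw [ih, e]
    · rw [ih, e]

-- processing a whole suffix `rest` of the string (starting at position q) from a
-- state that is at a run boundary (sp differs from the next class, or l = 0)
lemma pvChain (s : String) (cs : List Char) (m : Int) (hm : 1 ≤ m) :
    ∀ (rest : List Char) (q : Nat) (l : Int) (sp : Bool) (st : Int) (acc : List String),
      cs.drop q = rest →
      ((∀ h : rest ≠ [], sp ≠ PySem.Chars.isspace (rest.head h)) ∨ l = 0) →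
      ∃ l' sp',
        pvAloop s cs m rest.length (q : Int) l sp st acc =
          ( l', sp',
            (pvCuts m (pvRuns rest) (q : Int)).getLastD st,
            acc ++ pvWalk s st (pvCuts m (pvRuns rest) (q : Int)) ) ∧
        (∀ x, rest.getLast? = some x → sp' = PySem.Chars.isspace x) ∧
        (rest = [] → sp' = sp) := by
  intro rest
  induction rest using pvRuns.induct with
  | case1 =>
    intro q l sp st acc hdrop hentry
    exact ⟨l, sp, by simp [pvAloop, pvCuts, pvRuns, pvWalk], by simp, fun _ => rfl⟩
  | case2 c tail ih =>
    intro q l sp st acc hdrop hentry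
    have htd : tail.takeWhile (fun d => PySem.Chars.isspace d == PySem.Chars.isspace c)
        ++ tail.dropWhile (fun d => PySem.Chars.isspace d == PySem.Chars.isspace c) = tail :=
      List.takeWhile_append_dropWhile
    set p : Char → Bool := fun d => PySem.Chars.isspace d == PySem.Chars.isspace c with hp
    set t := tail.takeWhile p with ht
    set rest' := tail.dropWhile p with hrest'
    -- characters at positions q .. q + t.length have class (isspace c)
    have hgd : ∀ j : Nat, cs.getD (q + j) ' ' = (c :: tail).getD j ' ' :=
      fun j => pvGetD_drop cs (c :: tail) q j hdrop ' '
    have hclsq : ∀ j : Nat, q ≤ j → j < q + (t.length + 1) →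
        PySem.Chars.isspace (cs.getD j ' ') = PySem.Chars.isspace c := by
      intro j h1 h2
      obtain ⟨j', rfl⟩ : ∃ j', j = q + j' := ⟨j - q, by omega⟩
      rw [hgd j']
      rcases Nat.eq_zero_or_pos j' with hj | hj
      · subst hj; rfl
      · obtain ⟨j'', rfl⟩ : ∃ j'', j' = j'' + 1 := ⟨j' - 1, by omega⟩
        have hjt : j'' < t.length := by omega
        have hgt : (c :: tail).getD (j'' + 1) ' ' = t[j''] := by
          have h1 : (c :: tail).getD (j'' + 1) ' ' = tail.getD j'' ' ' := rfl
          have h2 : j'' < tail.length := by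
            have := congrArg List.length htd
            simp only [List.length_append] at this
            omega
          rw [h1, List.getD_eq_getElem tail ' ' h2]
          exact ((List.takeWhile_prefix p).getElem hjt).symm
        rw [hgt]
        have hpt : p t[j''] = true := List.mem_takeWhile_imp (List.getElem_mem hjt)
        exact eq_of_beq hpt
    -- split the loop into the first run and the remainder
    have hlen : (c :: tail).length = (t.length + 1) + rest'.length := by
      have := congrArg List.length htd
      simp only [List.length_append] at this
      simp only [List.length_cons]
      omega
    rw [hlen, pvAloop_add]
    -- the first step of the run: state becomes (1, isspace c, st, acc)
    have hc0 : PySem.Chars.isspace (PySem.List.pyGetD cs (q : Int) ' ') = PySem.Chars.isspace c := by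
      rw [PySem.List.pyGetD_natCast]
      exact hclsq q le_rfl (by omega)
    have hstep : pvAloop s cs m (t.length + 1) (q : Int) l sp st acc
        = pvAloop s cs m t.length ((q : Int) + 1) 1 (PySem.Chars.isspace c) st acc := by
      simp only [pvAloop, hc0]
      by_cases hsp : sp = PySem.Chars.isspace c
      · have hl0 : l = 0 := by
          rcases hentry with h | h
          · exact absurd hsp (h (by simp))
          · exact h
        subst hl0
        rw [hsp]
        simp
        intro h
        exact absurd h (by omega)
      · simp [hsp]
    rw [hstep]
    -- the rest of the first run, via pvRun_tail
    have hq1 : (q : Int) + 1 = ((q + 1 : Nat) : Int) := by push_cast; ring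
    rw [hq1, pvRun_tail s cs m hm (PySem.Chars.isspace c) t.length (q + 1) (q : Int) 1 st acc
      (fun j h1 h2 => hclsq j (by omega) (by omega))
      (by push_cast; omega) (by push_cast; omega) (by push_cast; ring)]
    -- the remaining runs, via the induction hypothesis
    have hdrop' : cs.drop (q + (t.length + 1)) = rest' := by
      rw [← List.drop_drop, hdrop]
      show tail.drop t.length = rest'
      conv_lhs => rw [← htd]
      exact List.drop_left
    have e2 : (q : Int) + ((t.length + 1 : Nat) : Int) = ((q + (t.length + 1) : Nat) : Int) := by
      push_cast; ring
    obtain ⟨l2, sp2, heq, hlast, hnil⟩ :=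
      ih (q + (t.length + 1))
        (((q + 1 : Nat) : Int) + (t.length : Int)
          - (PySem.List.pyRange ((q : Int) + m) (((q + 1 : Nat) : Int) + (t.length : Int)) m).getLastD (q : Int))
        (PySem.Chars.isspace c)
        ((PySem.List.pyRange ((q : Int) + m) (((q + 1 : Nat) : Int) + (t.length : Int)) m).getLastD st)
        (acc ++ pvWalk s st (PySem.List.pyRange ((q : Int) + m) (((q + 1 : Nat) : Int) + (t.length : Int)) m))
        hdrop'
        (Or.inl (fun h he =>
          (beq_eq_false_iff_ne.mp (List.head_dropWhile_not p h)) he.symm))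
    dsimp only
    rw [e2, heq]
    -- assemble: cuts of the first run ++ cuts of the remaining runs
    have hcuts : pvCuts m (pvRuns (c :: tail)) (q : Int)
        = PySem.List.pyRange ((q : Int) + m) ((q + (t.length + 1) : Nat) : Int) m
          ++ pvCuts m (pvRuns rest') ((q + (t.length + 1) : Nat) : Int) := by
      have hruns : pvRuns (c :: tail) = (t.length + 1) :: pvRuns rest' := by
        rw [pvRuns]
      rw [hruns]
      simp only [pvCuts]
      rw [e2]
    refine ⟨l2, sp2, ?_, ?_, by simp⟩
    · rw [hcuts, pvGetLastD_append, pvWalk_append s _ _ st, List.append_assoc,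
        show ((q + 1 : Nat) : Int) + (t.length : Int) = ((q + (t.length + 1) : Nat) : Int) by
          push_cast; ring]
    · intro x hx
      by_cases hre : rest' = []
      · -- the whole of c :: tail is one run; its last character has class (isspace c)
        rw [hnil hre]
        have hmem : x ∈ c :: tail := List.mem_of_getLast? hx
        rcases List.mem_cons.mp hmem with rfl | hxt
        · rfl
        · rw [← htd, hre, List.append_nil] at hxt
          have hpt : p x = true := List.mem_takeWhile_imp hxt
          exact (eq_of_beq hpt).symm
      · -- the last character of c :: tail is the last character of rest'
        apply hlast
        rw [← hx]
        have : (c :: tail).getLast? = rest'.getLast? := by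
          conv_lhs => rw [show c :: tail = (c :: t) ++ rest' by rw [← htd]; rfl]
          exact List.getLast?_append_of_ne_nil _ hre
        rw [this]

-- final slice s[st:] equals s[st:n] for 0 ≤ st
lemma pvSlice_from_eq (s : String) (st : Int) (h0 : 0 ≤ st) :
    PySem.Str.slice s (some st) none = PySem.Str.slice s (some st) (some (s.toList.length : Int)) := by
  unfold PySem.Str.slice
  congr 1
  rw [PySem.Chars.slice_eq_listSlice, PySem.Chars.slice_eq_listSlice]
  refine (PySem.List.slice_from s.toList h0).trans
    (Eq.trans ?_ (PySem.List.slice_toNat s.toList h0 (Int.natCast_nonneg _)).symm)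
  symm
  apply List.take_of_length_le
  simp [List.length_drop]

-- ===== VERDICT (by name: the statement is the Claim_ definition above) =====
theorem split_whitespaces_or_nonwhitespaces_py_spec : Claim_equal_split_whitespaces_or_nonwhitespaces_py := by
  intro s m _ hpre
  unfold Spec_split_whitespaces_or_nonwhitespaces_py
  rcases hpre with hm | hs
  · show split_whitespaces_or_nonwhitespaces_py s m = split_whitespaces_or_nonwhitespaces_py_alt s m
    simp only [split_whitespaces_or_nonwhitespaces_py, split_whitespaces_or_nonwhitespaces_py_alt]
    obtain ⟨l', sp', heq, -, -⟩ :=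
      pvChain s s.toList m hm s.toList 0 0
        (match s.toList with | [] => false | c :: _ => PySem.Chars.isspace c) 0 [] rfl (Or.inr rfl)
    push_cast at heq
    rw [heq]
    have h0 : (0 : Int) ≤ (pvCuts m (pvRuns s.toList) 0).getLastD 0 := by
      rcases pvGetLastD_mem_or_eq (pvCuts m (pvRuns s.toList) 0) 0 with h | h
      · omega
      · have := (pvCuts_mem_bounds m hm (pvRuns s.toList) 0 _ h).1
        omega
    rw [pvSlice_from_eq s _ h0]
    rw [List.tail_cons, pvWalk_eq_zip_map s (pvCuts m (pvRuns s.toList) 0 ++ [(s.toList.length : Int)]) 0]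
    rw [pvWalk_append s _ _ 0]
    simp [pvWalk]
  · subst hs
    show split_whitespaces_or_nonwhitespaces_py "" m = split_whitespaces_or_nonwhitespaces_py_alt "" m
    simp only [split_whitespaces_or_nonwhitespaces_py, split_whitespaces_or_nonwhitespaces_py_alt]
    rw [show ("" : String).toList = [] from rfl, show pvRuns ([] : List Char) = [] from by rw [pvRuns]]
    rfl
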